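-- pv_equiv track=rewrite | github.com/MrMimic/logflow | logflow/logsparser/Journal.py | create_vector
-- ===== SOURCE A (Python) =====
-- def create_vector(word : str) -> str:
--     """Create the vector of descriptors associated to a word
--
--     Args:
--         word (str): the word to describe using descriptors
--
--     Returns:
--         str: the descriptors
--     """
--     vector = ["0"]*5
--     number = False
--     lower = False
--     upper = False
--     alnum = False
--     for letter in word:
--         if letter.isdigit():
--             vector[3] = "1"
--             number = True
--         elif letter.islower():
--             vector[1] = "1"
--             lower = True
--         elif letter.isupper():
--             vector[0] = "1"
--             upper = True
--         elif not letter.isalnum():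
--             vector[2] = "1"
--             alnum = True
--         if number and lower and upper and alnum:
--             break
--     vector[4] = str(len(word))
--     str_vector = ''.join(vector)
--     return str_vector
-- ===== SOURCE B (Python) =====
-- def create_vector(word : str) -> str:
--     """Create the vector of descriptors associated to a word (independent scans)."""
--     return ''.join([
--         "1" if any(c.isupper() for c in word) else "0",
--         "1" if any(c.islower() for c in word) else "0",
--         "1" if any(not c.isalnum() for c in word) else "0",
--         "1" if any(c.isdigit() for c in word) else "0",
--         str(len(word)),
--     ])
-- ===== Notes on version B (the rewrite author's own statement) =====
-- stated objective: idiomatic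
-- what changed: Replaces A's single stateful loop with four mutable flags, in-place vector writes and an early break by five independent derivations: one any() scan per character-class flag plus str(len(word)), joined directly.
import Mathlib
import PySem

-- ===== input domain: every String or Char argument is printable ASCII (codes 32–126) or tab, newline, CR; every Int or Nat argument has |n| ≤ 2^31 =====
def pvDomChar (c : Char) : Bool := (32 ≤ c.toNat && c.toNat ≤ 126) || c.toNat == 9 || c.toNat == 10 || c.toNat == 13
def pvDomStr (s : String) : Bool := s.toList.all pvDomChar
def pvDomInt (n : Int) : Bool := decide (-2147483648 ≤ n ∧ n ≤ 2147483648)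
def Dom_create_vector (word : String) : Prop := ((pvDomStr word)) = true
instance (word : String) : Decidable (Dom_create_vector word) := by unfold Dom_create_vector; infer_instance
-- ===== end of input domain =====

-- B replaces A's single stateful loop (flags, in-place writes, early break) by one independent scan per descriptor; idiomatic, same cost.

-- ===== PORT A =====
-- the for-loop over word with the four flags, the in-place vector writes and the early break
def create_vector_loop : List Char → List String → Bool → Bool → Bool → Bool → List String
  | [], vector, _, _, _, _ => vector
  | letter :: rest, vector, number, lower, upper, alnum =>
    let s :=
      if PySem.Chars.isdigit letter then
        (PySem.List.pySetD vector 3 "1", true, lower, upper, alnum)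
      else if PySem.Chars.islower letter then
        (PySem.List.pySetD vector 1 "1", number, true, upper, alnum)
      else if PySem.Chars.isupper letter then
        (PySem.List.pySetD vector 0 "1", number, lower, true, alnum)
      else if !(PySem.Chars.isalnum letter) then
        (PySem.List.pySetD vector 2 "1", number, lower, upper, true)
      else
        (vector, number, lower, upper, alnum)
    match s with
    | (vector, number, lower, upper, alnum) =>
      if number && lower && upper && alnum then vector
      else create_vector_loop rest vector number lower upper alnum

def create_vector (word : String) : String :=
  let vector : List String := ["0", "0", "0", "0", "0"]
  let vector := create_vector_loop word.toList vector false false false false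
  let vector := PySem.List.pySetD vector 4 (PySem.Int.toStr (PySem.Str.len word))
  PySem.Str.join "" vector

-- ===== PORT B =====
def create_vector_alt (word : String) : String :=
  let cs := word.toList
  PySem.Str.join "" [
    if cs.any PySem.Chars.isupper then "1" else "0",
    if cs.any PySem.Chars.islower then "1" else "0",
    if cs.any (fun c => !PySem.Chars.isalnum c) then "1" else "0",
    if cs.any PySem.Chars.isdigit then "1" else "0",
    PySem.Int.toStr (PySem.Str.len word)]

-- ===== PRECONDITION & SPEC =====
def Spec_create_vector (word : String) (out : String) : Prop := out = create_vector_alt word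
instance (word : String) (out : String) : Decidable (Spec_create_vector word out) := by unfold Spec_create_vector; infer_instance

-- ===== CLAIM (what is proved, stated in full; the proofs are below) =====
def Claim_equal_create_vector : Prop := ∀ (word : String), Dom_create_vector word → Spec_create_vector word (create_vector word)

-- ===== LEMMAS AND PROOFS =====

-- the loop's vector, as a function of the four flags (entry 4 stays "0" during the loop)
def pvMkv (number lower upper alnum : Bool) : List String :=
  [if upper then "1" else "0", if lower then "1" else "0",
   if alnum then "1" else "0", if number then "1" else "0", "0"]

theorem pvSet3 (n l u a : Bool) :
    PySem.List.pySetD (pvMkv n l u a) 3 "1" = pvMkv true l u a := by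
  cases n <;> cases l <;> cases u <;> cases a <;> rfl

theorem pvSet1 (n l u a : Bool) :
    PySem.List.pySetD (pvMkv n l u a) 1 "1" = pvMkv n true u a := by
  cases n <;> cases l <;> cases u <;> cases a <;> rfl

theorem pvSet0 (n l u a : Bool) :
    PySem.List.pySetD (pvMkv n l u a) 0 "1" = pvMkv n l true a := by
  cases n <;> cases l <;> cases u <;> cases a <;> rfl

theorem pvSet2 (n l u a : Bool) :
    PySem.List.pySetD (pvMkv n l u a) 2 "1" = pvMkv n l u true := by
  cases n <;> cases l <;> cases u <;> cases a <;> rfl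

theorem pvDigit_not_lower (c : Char) (h : PySem.Chars.isdigit c = true) :
    PySem.Chars.islower c = false := by
  simp only [PySem.Chars.isdigit, Bool.and_eq_true, decide_eq_true_eq, Char.le_def,
    UInt32.le_iff_toNat_le] at h
  simp only [PySem.Chars.islower, Bool.and_eq_false_iff, decide_eq_false_iff_not, Char.le_def,
    UInt32.le_iff_toNat_le]
  have h9 : '9'.val.toNat = 57 := rfl
  have ha : 'a'.val.toNat = 97 := rfl
  left; omega

theorem pvDigit_not_upper (c : Char) (h : PySem.Chars.isdigit c = true) :
    PySem.Chars.isupper c = false := by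
  simp only [PySem.Chars.isdigit, Bool.and_eq_true, decide_eq_true_eq, Char.le_def,
    UInt32.le_iff_toNat_le] at h
  simp only [PySem.Chars.isupper, Bool.and_eq_false_iff, decide_eq_false_iff_not, Char.le_def,
    UInt32.le_iff_toNat_le]
  have h9 : '9'.val.toNat = 57 := rfl
  have hA : 'A'.val.toNat = 65 := rfl
  left; omega

theorem pvLower_not_upper (c : Char) (h : PySem.Chars.islower c = true) :
    PySem.Chars.isupper c = false := by
  simp only [PySem.Chars.islower, Bool.and_eq_true, decide_eq_true_eq, Char.le_def,
    UInt32.le_iff_toNat_le] at h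
  simp only [PySem.Chars.isupper, Bool.and_eq_false_iff, decide_eq_false_iff_not, Char.le_def,
    UInt32.le_iff_toNat_le]
  have hZ : 'Z'.val.toNat = 90 := rfl
  have ha : 'a'.val.toNat = 97 := rfl
  right; omega

theorem pvLoopEq (cs : List Char) : ∀ (n l u a : Bool),
    create_vector_loop cs (pvMkv n l u a) n l u a =
      pvMkv (n || cs.any PySem.Chars.isdigit) (l || cs.any PySem.Chars.islower)
            (u || cs.any PySem.Chars.isupper) (a || cs.any (fun c => !PySem.Chars.isalnum c)) := by
  induction cs with
  | nil => intro n l u a; simp [create_vector_loop]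
  | cons c cs ih =>
    intro n l u a
    by_cases hd : PySem.Chars.isdigit c = true
    · have hlc := pvDigit_not_lower c hd
      have huc := pvDigit_not_upper c hd
      have hac : (!PySem.Chars.isalnum c) = false := by
        simp [PySem.Chars.isalnum, hd]
      simp only [create_vector_loop, hd, if_true, List.any_cons, hac, hlc, huc, Bool.false_or]
      rw [pvSet3]
      by_cases h : (true && l && u && a) = true
      · obtain ⟨⟨⟨-, hl⟩, hu⟩, haa⟩ : ((True ∧ l = true) ∧ u = true) ∧ a = true := by
          simpa [Bool.and_eq_true] using h
        simp [hl, hu, haa]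
      · simp only [h, if_neg, Bool.false_eq_true, not_false_eq_true, ih]
        simp
    · by_cases hl : PySem.Chars.islower c = true
      · have huc := pvLower_not_upper c hl
        have hac : (!PySem.Chars.isalnum c) = false := by
          simp [PySem.Chars.isalnum, PySem.Chars.isalpha, hl]
        have hdc : PySem.Chars.isdigit c = false := by simpa using hd
        simp only [create_vector_loop, hd, hl, if_true, List.any_cons, hac, huc,
          Bool.false_or]
        rw [pvSet1]
        by_cases h : (n && true && u && a) = true
        · obtain ⟨⟨⟨hn, -⟩, hu⟩, haa⟩ : ((n = true ∧ True) ∧ u = true) ∧ a = true := by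
            simpa [Bool.and_eq_true] using h
          simp [hn, hu, haa]
        · simp only [h, if_neg, Bool.false_eq_true, not_false_eq_true, ih]
          simp
      · by_cases hu : PySem.Chars.isupper c = true
        · have hac : (!PySem.Chars.isalnum c) = false := by
            simp [PySem.Chars.isalnum, PySem.Chars.isalpha, hu]
          have hdc : PySem.Chars.isdigit c = false := by simpa using hd
          have hlc : PySem.Chars.islower c = false := by simpa using hl
          simp only [create_vector_loop, hd, hl, hu, if_true, List.any_cons, hac,
            Bool.false_or]
          rw [pvSet0]
          by_cases h : (n && l && true && a) = true
          · obtain ⟨⟨⟨hn, hll⟩, -⟩, haa⟩ : ((n = true ∧ l = true) ∧ True) ∧ a = true := by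
              simpa [Bool.and_eq_true] using h
            simp [hn, hll, haa]
          · simp only [h, if_neg, Bool.false_eq_true, not_false_eq_true, ih]
            simp
        · have hac : (!PySem.Chars.isalnum c) = true := by
            simp [PySem.Chars.isalnum, PySem.Chars.isalpha, hd, hl, hu]
          have hdc : PySem.Chars.isdigit c = false := by simpa using hd
          have hlc : PySem.Chars.islower c = false := by simpa using hl
          have huc : PySem.Chars.isupper c = false := by simpa using hu
          simp only [create_vector_loop, hd, hl, hu, hac, if_true, List.any_cons,
            Bool.false_or]
          rw [pvSet2]
          by_cases h : (n && l && u && true) = true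
          · obtain ⟨⟨⟨hn, hll⟩, huu⟩, -⟩ : ((n = true ∧ l = true) ∧ u = true) ∧ True := by
              simpa [Bool.and_eq_true] using h
            simp [hn, hll, huu]
          · simp only [h, if_neg, Bool.false_eq_true, not_false_eq_true, ih]
            simp

theorem pvSet4 (n l u a : Bool) (s : String) :
    PySem.List.pySetD (pvMkv n l u a) 4 s =
      [if u then "1" else "0", if l then "1" else "0",
       if a then "1" else "0", if n then "1" else "0", s] := by
  cases n <;> cases l <;> cases u <;> cases a <;> rfl

-- ===== VERDICT (by name: the statement is the Claim_ definition above) =====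
theorem create_vector_spec : Claim_equal_create_vector := by
  intro word _
  show create_vector word = create_vector_alt word
  unfold create_vector create_vector_alt
  have h0 : (["0", "0", "0", "0", "0"] : List String) = pvMkv false false false false := rfl
  simp only [h0, pvLoopEq, Bool.false_or, pvSet4]
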